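-- pv_equiv track=rewrite | github.com/afrozkhan346/RepoRover-AI | backend/app/services/quality_analysis_service.py | _function_lengths_python
-- ===== SOURCE A (Python) =====
-- def _function_lengths_python(content: str) -> list[int]:
--     lines = content.splitlines()
--     lengths: list[int] = []
--     current_start: int | None = None
--     current_indent: int | None = None
--
--     for index, line in enumerate(lines):
--         stripped = line.lstrip()
--         indent = len(line) - len(stripped)
--         if stripped.startswith("def "):
--             if current_start is not None:
--                 lengths.append(index - current_start)
--             current_start = index
--             current_indent = indent
--             continue
--
--         if current_start is not None and stripped and current_indent is not None and indent <= current_indent: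
--             lengths.append(index - current_start)
--             current_start = None
--             current_indent = None
--
--     if current_start is not None:
--         lengths.append(len(lines) - current_start)
--
--     return lengths
-- ===== SOURCE B (Python) =====
-- def _span(rest, d):
--     for off, other in enumerate(rest):
--         s = other.lstrip()
--         if s.startswith("def ") or (s and len(other) - len(s) <= d):
--             return off
--     return len(rest)
--
--
-- def _function_lengths_python(content: str) -> list[int]:
--     lines = content.splitlines()
--     lengths: list[int] = []
--     for pos, line in enumerate(lines):
--         stripped = line.lstrip()
--         if stripped.startswith("def "):
--             d = len(line) - len(stripped)
--             lengths.append(_span(lines[pos + 1:], d) + 1)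
--     return lengths
-- ===== Notes on version B (the rewrite author's own statement) =====
-- stated objective: alternative
-- what changed: Replaced A's single-pass state machine (current_start/current_indent accumulator) with a per-def forward rescan: for each function-definition line, scan its tail for the first closing line (the next definition, or a non-blank line at indent at most the definition's) and emit the span length.
import Mathlib
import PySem

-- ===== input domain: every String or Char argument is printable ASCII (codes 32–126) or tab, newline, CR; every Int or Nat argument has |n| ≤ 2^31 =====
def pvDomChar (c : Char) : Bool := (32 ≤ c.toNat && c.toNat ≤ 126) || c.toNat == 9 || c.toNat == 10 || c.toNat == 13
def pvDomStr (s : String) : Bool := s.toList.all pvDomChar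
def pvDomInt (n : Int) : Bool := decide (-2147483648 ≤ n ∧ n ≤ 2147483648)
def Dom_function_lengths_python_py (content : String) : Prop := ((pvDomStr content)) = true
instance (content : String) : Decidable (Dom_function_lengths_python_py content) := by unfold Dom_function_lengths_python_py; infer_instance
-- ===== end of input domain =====

-- B replaces A's single-pass state machine with a per-def forward rescan (alternative decomposition, same results).

-- ===== PORT A =====
-- A's for-loop over enumerate(lines) with state (lengths, current_start, current_indent),
-- as the obvious structural recursion carrying the index; at list end idx = len(lines),
-- so the post-loop append of len(lines) - current_start is the [] case.
def pvALoop (lines : List String) (idx : Int) (lengths : List Int)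
    (currentStart currentIndent : Option Int) : List Int :=
  match lines with
  | [] =>
    match currentStart with
    | some cs => lengths ++ [idx - cs]
    | none => lengths
  | line :: rest =>
    let stripped := PySem.Str.lstrip line
    let indent : Int := PySem.Str.len line - PySem.Str.len stripped
    match currentStart, currentIndent with
    | some cs, some ci =>
      if PySem.Str.startswith stripped "def " then
        pvALoop rest (idx + 1) (lengths ++ [idx - cs]) (some idx) (some indent)
      else if stripped ≠ "" ∧ indent ≤ ci then
        pvALoop rest (idx + 1) (lengths ++ [idx - cs]) none none
      else
        pvALoop rest (idx + 1) lengths (some cs) (some ci)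
    | some cs, none =>
      if PySem.Str.startswith stripped "def " then
        pvALoop rest (idx + 1) (lengths ++ [idx - cs]) (some idx) (some indent)
      else
        pvALoop rest (idx + 1) lengths (some cs) none
    | none, ci =>
      if PySem.Str.startswith stripped "def " then
        pvALoop rest (idx + 1) lengths (some idx) (some indent)
      else
        pvALoop rest (idx + 1) lengths none ci

def function_lengths_python_py (content : String) : List Int :=
  pvALoop (PySem.Str.splitlines content) 0 [] none none

-- ===== PORT B =====
-- _span(rest, d): offset of the first line of rest that starts (after lstrip) with "def ",
-- or is non-blank with indent ≤ d; len(rest) if none.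
def pvSpan (rest : List String) (d : Int) : Int :=
  match rest with
  | [] => 0
  | other :: tl =>
    let s := PySem.Str.lstrip other
    if PySem.Str.startswith s "def " ∨ (s ≠ "" ∧ PySem.Str.len other - PySem.Str.len s ≤ d) then
      0
    else
      1 + pvSpan tl d

-- the main loop of B: for each "def " line, emit _span(lines[pos+1:], d) + 1
def pvBLoop (lines : List String) : List Int :=
  match lines with
  | [] => []
  | line :: rest =>
    let stripped := PySem.Str.lstrip line
    if PySem.Str.startswith stripped "def " then
      (pvSpan rest (PySem.Str.len line - PySem.Str.len stripped) + 1) :: pvBLoop rest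
    else
      pvBLoop rest

def function_lengths_python_py_alt (content : String) : List Int :=
  pvBLoop (PySem.Str.splitlines content)

-- ===== PRECONDITION & SPEC =====
def Spec_function_lengths_python_py (content : String) (out : List Int) : Prop := out = function_lengths_python_py_alt content
instance (content : String) (out : List Int) : Decidable (Spec_function_lengths_python_py content out) := by unfold Spec_function_lengths_python_py; infer_instance

-- ===== CLAIM (what is proved, stated in full; the proofs are below) =====
def Claim_equal_function_lengths_python_py : Prop := ∀ (content : String), Dom_function_lengths_python_py content → Spec_function_lengths_python_py content (function_lengths_python_py content)

-- ===== LEMMAS AND PROOFS =====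

-- the accumulator only prepends
theorem pvALoop_append (lines : List String) (idx : Int) (lengths : List Int)
    (cs ci : Option Int) :
    pvALoop lines idx lengths cs ci = lengths ++ pvALoop lines idx [] cs ci := by
  induction lines generalizing idx lengths cs ci with
  | nil =>
    cases cs <;> simp [pvALoop]
  | cons line rest ih =>
    rcases cs with _ | v <;> rcases ci with _ | w <;>
      simp only [pvALoop] <;> split_ifs <;>
      (try simp only [List.nil_append]) <;>
      (try rw [ih (lengths := lengths ++ [idx - v]), ih (lengths := [idx - v])]) <;>
      (try rw [ih (lengths := lengths), ih (lengths := [])]) <;> simp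

-- the simultaneous characterisation of A's loop by B's per-def spans
theorem pvALoop_eq_pvBLoop (lines : List String) :
    (∀ idx : Int, pvALoop lines idx [] none none = pvBLoop lines) ∧
    (∀ (idx s d : Int),
      pvALoop lines idx [] (some s) (some d) = (idx + pvSpan lines d - s) :: pvBLoop lines) := by
  induction lines with
  | nil =>
    refine ⟨fun idx => rfl, fun idx s d => ?_⟩
    simp [pvALoop, pvSpan, pvBLoop]
  | cons line rest ih =>
    obtain ⟨ihn, ihs⟩ := ih
    refine ⟨fun idx => ?_, fun idx s d => ?_⟩
    · by_cases hdef : PySem.Str.startswith (PySem.Str.lstrip line) "def " = true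
      · simp only [pvALoop, pvBLoop]
        rw [if_pos hdef, if_pos hdef, ihs]
        congr 1
        ring
      · simp only [pvALoop, pvBLoop]
        rw [if_neg hdef, if_neg hdef]
        exact ihn (idx + 1)
    · by_cases hdef : PySem.Str.startswith (PySem.Str.lstrip line) "def " = true
      · simp only [pvALoop, pvBLoop, pvSpan]
        rw [if_pos hdef, if_pos hdef, if_pos (Or.inl hdef), pvALoop_append, ihs]
        simp only [List.nil_append, List.singleton_append, List.cons.injEq, and_true]
        omega
      · by_cases hcl : PySem.Str.lstrip line ≠ "" ∧
            PySem.Str.len line - PySem.Str.len (PySem.Str.lstrip line) ≤ d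
        · simp only [pvALoop, pvBLoop, pvSpan]
          rw [if_neg hdef, if_neg hdef, if_pos hcl, if_pos (Or.inr hcl), pvALoop_append, ihn]
          simp only [List.nil_append, List.singleton_append, List.cons.injEq, and_true]
          omega
        · have hor : ¬ (PySem.Str.startswith (PySem.Str.lstrip line) "def " = true ∨
              (PySem.Str.lstrip line ≠ "" ∧
                PySem.Str.len line - PySem.Str.len (PySem.Str.lstrip line) ≤ d)) := by
            rintro (h | h)
            · exact hdef h
            · exact hcl h
          simp only [pvALoop, pvBLoop, pvSpan]
          rw [if_neg hdef, if_neg hdef, if_neg hcl, if_neg hor, ihs]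
          simp only [List.cons.injEq, and_true]
          omega

-- ===== VERDICT (by name: the statement is the Claim_ definition above) =====
theorem function_lengths_python_py_spec : Claim_equal_function_lengths_python_py := by
  intro content _
  unfold Spec_function_lengths_python_py function_lengths_python_py function_lengths_python_py_alt
  exact (pvALoop_eq_pvBLoop (PySem.Str.splitlines content)).1 0
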